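-- pv_equiv track=rewrite | github.com/ohjisu320/codingtest | 프로그래머스/1/42862. 체육복/체육복.py | solution
-- ===== SOURCE A (Python) =====
-- def solution(n, lost, reserve):
--     lost_set = set(lost)-set(reserve)
--     reserve_set = set(reserve)-set(lost)
--
--     for i in sorted(lost_set) :
--         if i-1 in reserve_set :
--             reserve_set.remove(i-1)
--             lost_set.remove(i)
--         elif i+1 in reserve_set :
--             reserve_set.remove(i+1)
--             lost_set.remove(i)
--     return n-len(lost_set)
-- ===== SOURCE B (Python) =====
-- def solution(n, lost, reserve):
--     # two-pointer sweep over the two sorted disjoint lists instead of set removals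
--     need = sorted(set(lost) - set(reserve))
--     spare = sorted(set(reserve) - set(lost))
--     matched = 0
--     j = 0
--     for i in need:
--         while j < len(spare) and spare[j] < i - 1:
--             j += 1
--         if j < len(spare) and (spare[j] == i - 1 or spare[j] == i + 1):
--             matched += 1
--             j += 1
--     return n - len(need) + matched
-- ===== Notes on version B (the rewrite author's own statement) =====
-- stated objective: alternative
-- what changed: Replaces A's mutable-set greedy (membership tests and removals in a reserve set while iterating the sorted lost set) by a single two-pointer sweep over the two sorted disjoint lists that only counts matches, with no set mutation.
import Mathlib
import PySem

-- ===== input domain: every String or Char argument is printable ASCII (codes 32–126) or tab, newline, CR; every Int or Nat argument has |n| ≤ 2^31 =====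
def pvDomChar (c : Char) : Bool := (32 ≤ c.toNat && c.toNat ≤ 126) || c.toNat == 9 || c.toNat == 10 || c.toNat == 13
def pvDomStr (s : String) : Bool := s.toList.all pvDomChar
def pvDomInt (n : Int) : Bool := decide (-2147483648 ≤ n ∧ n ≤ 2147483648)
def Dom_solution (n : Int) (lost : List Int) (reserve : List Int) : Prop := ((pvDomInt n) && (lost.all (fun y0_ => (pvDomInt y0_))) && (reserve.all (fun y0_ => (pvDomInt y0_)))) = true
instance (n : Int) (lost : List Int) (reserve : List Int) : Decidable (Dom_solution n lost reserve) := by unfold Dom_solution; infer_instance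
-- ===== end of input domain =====

-- B replaces A's set-removal greedy by a single two-pointer sweep over the two sorted disjoint lists (objective: alternative decomposition).

-- ===== PORT A =====
-- loop body of A's for-loop; set.remove is ported as Set.discard, exact here because each
-- remove is guarded by the corresponding membership test
def solnStep (st : PySem.Set Int × PySem.Set Int) (i : Int) : PySem.Set Int × PySem.Set Int :=
  if PySem.Set.contains st.2 (i - 1) then
    (PySem.Set.discard st.1 i, PySem.Set.discard st.2 (i - 1))
  else if PySem.Set.contains st.2 (i + 1) then
    (PySem.Set.discard st.1 i, PySem.Set.discard st.2 (i + 1))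
  else st

def solution (n : Int) (lost : List Int) (reserve : List Int) : Int :=
  let lostSet : PySem.Set Int := PySem.Set.diff (PySem.Set.ofList lost) (PySem.Set.ofList reserve)
  let reserveSet : PySem.Set Int := PySem.Set.diff (PySem.Set.ofList reserve) (PySem.Set.ofList lost)
  let final := (PySem.List.sorted lostSet (fun x => x) false).foldl solnStep (lostSet, reserveSet)
  n - PySem.Set.len final.1

-- ===== PORT B =====
-- the for-loop of Source B: `j` is represented by the remaining suffix of `spare`,
-- the inner while-loop is the dropWhile
def solutionAltGo : List Int → List Int → Int → Int
  | [], _, matched => matched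
  | i :: ns, spare, matched =>
    let rest := spare.dropWhile (fun y => decide (y < i - 1))
    match rest with
    | [] => solutionAltGo ns rest matched
    | x :: r =>
      if x = i - 1 ∨ x = i + 1 then solutionAltGo ns r (matched + 1)
      else solutionAltGo ns rest matched

def solution_alt (n : Int) (lost : List Int) (reserve : List Int) : Int :=
  let need := PySem.List.sorted (PySem.Set.diff (PySem.Set.ofList lost) (PySem.Set.ofList reserve)) (fun x => x) false
  let spare := PySem.List.sorted (PySem.Set.diff (PySem.Set.ofList reserve) (PySem.Set.ofList lost)) (fun x => x) false
  n - (need.length : Int) + solutionAltGo need spare 0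

-- ===== PRECONDITION & SPEC =====
def Spec_solution (n : Int) (lost : List Int) (reserve : List Int) (out : Int) : Prop := out = solution_alt n lost reserve
instance (n : Int) (lost : List Int) (reserve : List Int) (out : Int) : Decidable (Spec_solution n lost reserve out) := by unfold Spec_solution; infer_instance

-- ===== CLAIM (what is proved, stated in full; the proofs are below) =====
def Claim_equal_solution : Prop := ∀ (n : Int) (lost : List Int) (reserve : List Int), Dom_solution n lost reserve → Spec_solution n lost reserve (solution n lost reserve)

-- ===== LEMMAS AND PROOFS =====

-- membership in the dropped list, for a strictly increasing list
theorem mem_dropWhile_lt (spare : List Int) (h : spare.Pairwise (· < ·)) (c x : Int) :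
    x ∈ spare.dropWhile (fun y => decide (y < c)) ↔ x ∈ spare ∧ c ≤ x := by
  induction spare with
  | nil => simp
  | cons y ys ih =>
    rcases List.pairwise_cons.mp h with ⟨hy, hys⟩
    by_cases hyc : y < c
    · rw [List.dropWhile_cons_of_pos (by simpa using hyc), ih hys]
      constructor
      · rintro ⟨hm, hc⟩; exact ⟨List.mem_cons_of_mem _ hm, hc⟩
      · rintro ⟨hm, hc⟩
        rcases List.mem_cons.mp hm with rfl | hm
        · omega
        · exact ⟨hm, hc⟩
    · rw [List.dropWhile_cons_of_neg (by simpa using hyc)]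
      constructor
      · intro hm
        refine ⟨hm, ?_⟩
        rcases List.mem_cons.mp hm with rfl | hm
        · omega
        · have := hy _ hm; omega
      · exact fun h => h.1

theorem length_discard_of_mem (s : List Int) (h : s.Nodup) (x : Int) (hx : x ∈ s) :
    (PySem.Set.discard s x).length + 1 = s.length := by
  have hperm : (PySem.Set.discard s x).Perm (s.erase x) := by
    refine (List.perm_ext_iff_of_nodup (PySem.Set.nodup_discard s x h) (h.erase x)).mpr ?_
    intro y
    rw [PySem.Set.mem_discard, h.mem_erase_iff]
    tauto
  rw [hperm.length_eq]
  exact List.length_erase_add_one hx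

-- the main simulation: A's fold over the sorted lost list, paired with B's two-pointer
-- sweep; `rs` (A's reserve set) agrees with the sorted suffix `spare` on all values that
-- can still matter, and each matched element shrinks `ls` by exactly one
theorem key (need : List Int) : ∀ (ls rs spare : List Int) (m : Int),
    need.Pairwise (· < ·) →
    spare.Pairwise (· < ·) →
    ls.Nodup →
    (∀ i ∈ need, i ∈ ls) →
    (∀ i ∈ need, i ∉ rs) →
    (∀ x : Int, (∃ i, need.head? = some i ∧ i - 1 ≤ x) → (x ∈ rs ↔ x ∈ spare)) →
    ((need.foldl solnStep (ls, rs)).1.length : Int) + solutionAltGo need spare m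
      = (ls.length : Int) + m := by
  induction need with
  | nil => intro ls rs spare m _ _ _ _ _ _; simp [solutionAltGo]
  | cons i ns ih =>
    intro ls rs spare m hneed hspare hnodup hsub hdis hrel
    rcases List.pairwise_cons.mp hneed with ⟨hins, hns⟩
    have hi_ls : i ∈ ls := hsub i (List.mem_cons_self ..)
    have hi_rs : i ∉ rs := hdis i (List.mem_cons_self ..)
    have hmem : ∀ x, i - 1 ≤ x → (x ∈ rs ↔ x ∈ spare) := fun x hx => hrel x ⟨i, rfl, hx⟩
    have hrestmem : ∀ x, x ∈ spare.dropWhile (fun y => decide (y < i - 1)) ↔ x ∈ spare ∧ i - 1 ≤ x :=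
      mem_dropWhile_lt spare hspare (i - 1)
    have hrestpw : (spare.dropWhile (fun y => decide (y < i - 1))).Pairwise (· < ·) :=
      hspare.sublist (List.dropWhile_sublist _)
    have hrs_rest : ∀ x, i - 1 ≤ x →
        (x ∈ rs ↔ x ∈ spare.dropWhile (fun y => decide (y < i - 1))) := by
      intro x hx; rw [hmem x hx, hrestmem]; tauto
    have hi_rest : i ∉ spare.dropWhile (fun y => decide (y < i - 1)) :=
      fun h => hi_rs ((hrs_rest i (by omega)).mpr h)
    -- shared facts for the recursive calls
    have hsub' : ∀ j ∈ ns, j ∈ ls := fun j hj => hsub j (List.mem_cons_of_mem _ hj)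
    have hhead_ns : ∀ x : Int, (∃ i2, ns.head? = some i2 ∧ i2 - 1 ≤ x) → i ≤ x := by
      rintro x ⟨i2, h2, hx⟩
      have : i2 ∈ ns := List.mem_of_mem_head? (h2 ▸ rfl)
      have := hins i2 this; omega
    rw [List.foldl_cons]
    cases hR : spare.dropWhile (fun y => decide (y < i - 1)) with
    | nil =>
      have h1 : i - 1 ∉ rs := fun h => by
        have := (hrs_rest (i - 1) le_rfl).mp h; rw [hR] at this; simp at this
      have h2 : i + 1 ∉ rs := fun h => by
        have := (hrs_rest (i + 1) (by omega)).mp h; rw [hR] at this; simp at this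
      have hstep : solnStep (ls, rs) i = (ls, rs) := by
        rw [solnStep, if_neg, if_neg]
        · exact fun h => h2 ((PySem.Set.contains_iff _ _).mp h)
        · exact fun h => h1 ((PySem.Set.contains_iff _ _).mp h)
      rw [hstep]
      have hB : solutionAltGo (i :: ns) spare m = solutionAltGo ns [] m := by
        rw [solutionAltGo]; rw [hR]
      rw [hB]
      refine ih ls rs [] m hns (by simp) hnodup hsub'
        (fun j hj => hdis j (List.mem_cons_of_mem _ hj)) ?_
      intro x hx
      have hix := hhead_ns x hx
      rw [hrs_rest x (by omega), hR]
    | cons x0 r =>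
      have hx0_rest : x0 ∈ spare.dropWhile (fun y => decide (y < i - 1)) := by
        rw [hR]; exact List.mem_cons_self ..
      have hx0ge : i - 1 ≤ x0 := ((hrestmem x0).mp hx0_rest).2
      have hx0r : ∀ z ∈ r, x0 < z := (List.pairwise_cons.mp (hR ▸ hrestpw)).1
      have hx0ne : x0 ≠ i := fun h => hi_rest (h ▸ hx0_rest)
      have hrpw : r.Pairwise (· < ·) := (List.pairwise_cons.mp (hR ▸ hrestpw)).2
      have hhead : ∀ y, y ∈ spare.dropWhile (fun y => decide (y < i - 1)) → y ≤ x0 → y = x0 := by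
        intro y hy hle
        rw [hR] at hy
        rcases List.mem_cons.mp hy with rfl | hy
        · rfl
        · have := hx0r y hy; omega
      have hB : solutionAltGo (i :: ns) spare m =
          if x0 = i - 1 ∨ x0 = i + 1 then solutionAltGo ns r (m + 1)
          else solutionAltGo ns (x0 :: r) m := by
        rw [solutionAltGo]; rw [hR]
      by_cases hx01 : x0 = i - 1
      · -- A lends from the left neighbour; B's pointer sits on i-1
        have hArs : i - 1 ∈ rs := (hrs_rest (i - 1) le_rfl).mpr (hx01 ▸ hx0_rest)
        have hstep : solnStep (ls, rs) i = (PySem.Set.discard ls i, PySem.Set.discard rs (i - 1)) := by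
          rw [solnStep, if_pos ((PySem.Set.contains_iff _ _).mpr hArs)]
        rw [hstep, hB, if_pos (Or.inl hx01)]
        have hlen := length_discard_of_mem ls hnodup i hi_ls
        have := ih (PySem.Set.discard ls i) (PySem.Set.discard rs (i - 1)) r (m + 1)
          hns hrpw (PySem.Set.nodup_discard _ _ hnodup)
          (fun j hj => (PySem.Set.mem_discard ..).mpr ⟨hsub' j hj, fun h => by have := hins j hj; omega⟩)
          (fun j hj h => hdis j (List.mem_cons_of_mem _ hj) ((PySem.Set.mem_discard ..).mp h).1)
          ?_
        · omega
        · intro x hx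
          have hix := hhead_ns x hx
          rw [PySem.Set.mem_discard, hrs_rest x (by omega), hR, List.mem_cons]
          constructor
          · rintro ⟨h1 | h1, h2⟩
            · omega
            · exact h1
          · intro h; exact ⟨Or.inr h, fun hc => by have := hx0r x h; omega⟩
      · have hA1 : i - 1 ∉ rs := fun h => by
          have hin := (hrs_rest (i - 1) le_rfl).mp h
          exact hx01 (hhead (i - 1) hin (by omega)).symm
        have hx0gt : i + 1 ≤ x0 := by
          rcases lt_or_ge x0 (i + 1) with h | h
          · exfalso; rcases (by omega : x0 = i - 1 ∨ x0 = i) with h' | h'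
            · exact hx01 h'
            · exact hx0ne h'
          · exact h
        by_cases hx02 : x0 = i + 1
        · -- A lends from the right neighbour; B's pointer sits on i+1
          subst hx02
          have hArs : i + 1 ∈ rs := (hrs_rest (i + 1) (by omega)).mpr hx0_rest
          have hstep : solnStep (ls, rs) i =
              (PySem.Set.discard ls i, PySem.Set.discard rs (i + 1)) := by
            rw [solnStep, if_neg (fun h => hA1 ((PySem.Set.contains_iff _ _).mp h)),
              if_pos ((PySem.Set.contains_iff _ _).mpr hArs)]
          rw [hstep, hB, if_pos (Or.inr rfl)]
          have hlen := length_discard_of_mem ls hnodup i hi_ls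
          have := ih (PySem.Set.discard ls i) (PySem.Set.discard rs (i + 1)) r (m + 1)
            hns hrpw (PySem.Set.nodup_discard _ _ hnodup)
            (fun j hj => (PySem.Set.mem_discard ..).mpr ⟨hsub' j hj, fun h => by have := hins j hj; omega⟩)
            (fun j hj h => hdis j (List.mem_cons_of_mem _ hj) ((PySem.Set.mem_discard ..).mp h).1)
            ?_
          · omega
          · intro x hx
            have hix := hhead_ns x hx
            rw [PySem.Set.mem_discard, hrs_rest x (by omega), hR, List.mem_cons]
            constructor
            · rintro ⟨h1 | h1, h2⟩
              · omega
              · exact h1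
            · intro h; exact ⟨Or.inr h, fun hc => by have := hx0r x h; omega⟩
        · -- no lender available on either side
          have hA2 : i + 1 ∉ rs := fun h => by
            have hin := (hrs_rest (i + 1) (by omega)).mp h
            exact hx02 (hhead (i + 1) hin (by omega)).symm
          have hstep : solnStep (ls, rs) i = (ls, rs) := by
            rw [solnStep, if_neg (fun h => hA1 ((PySem.Set.contains_iff _ _).mp h)),
              if_neg (fun h => hA2 ((PySem.Set.contains_iff _ _).mp h))]
          rw [hstep, hB, if_neg (by tauto)]
          refine ih ls rs (x0 :: r) m hns (hR ▸ hrestpw) hnodup hsub'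
            (fun j hj => hdis j (List.mem_cons_of_mem _ hj)) ?_
          intro x hx
          have hix := hhead_ns x hx
          rw [hrs_rest x (by omega), hR]

-- ===== VERDICT (by name: the statement is the Claim_ definition above) =====
theorem solution_spec : Claim_equal_solution := by
  intro n lost reserve _
  simp only [Spec_solution, solution, solution_alt, PySem.Set.len]
  set L : PySem.Set Int := PySem.Set.diff (PySem.Set.ofList lost) (PySem.Set.ofList reserve) with hL
  set R : PySem.Set Int := PySem.Set.diff (PySem.Set.ofList reserve) (PySem.Set.ofList lost) with hRdef
  have hLnd : L.Nodup := PySem.Set.nodup_diff _ _ (PySem.Set.nodup_ofList _)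
  have hRnd : R.Nodup := PySem.Set.nodup_diff _ _ (PySem.Set.nodup_ofList _)
  set need := PySem.List.sorted L (fun x => x) false with hneed
  set spare := PySem.List.sorted R (fun x => x) false with hspare
  have hneedperm : need.Perm L := PySem.List.sorted_perm ..
  have hspareperm : spare.Perm R := PySem.List.sorted_perm ..
  have hneednd : need.Nodup := hneedperm.nodup_iff.mpr hLnd
  have hsparend : spare.Nodup := hspareperm.nodup_iff.mpr hRnd
  have hneedpw : need.Pairwise (· < ·) := by
    have h1 : need.Pairwise (fun a b : Int => a ≤ b) := PySem.List.sorted_pairwise ..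
    exact (h1.and hneednd).imp (fun h => lt_of_le_of_ne h.1 h.2)
  have hsparepw : spare.Pairwise (· < ·) := by
    have h1 : spare.Pairwise (fun a b : Int => a ≤ b) := PySem.List.sorted_pairwise ..
    exact (h1.and hsparend).imp (fun h => lt_of_le_of_ne h.1 h.2)
  have hsub : ∀ i ∈ need, i ∈ L := fun i hi => hneedperm.mem_iff.mp hi
  have hdis : ∀ i ∈ need, i ∉ R := by
    intro i hi hiR
    have h1 := (PySem.Set.mem_diff ..).mp (hsub i hi)
    have h2 := (PySem.Set.mem_diff ..).mp hiR
    exact h1.2 h2.1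
  have hrel : ∀ x : Int, (∃ i, need.head? = some i ∧ i - 1 ≤ x) → (x ∈ R ↔ x ∈ spare) :=
    fun x _ => hspareperm.mem_iff.symm
  have hkey := key need L R spare 0 hneedpw hsparepw hLnd hsub hdis hrel
  have hlen : need.length = L.length := hneedperm.length_eq
  omega
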